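-- pv_equiv track=rewrite | github.com/lixiangrui899/PINN | uq_pinn_mfl_research/src/uq_pinn_mfl/data/splits.py | build_lopo_schedule
-- ===== SOURCE A (Python) =====
-- def build_lopo_schedule(position_ids: list[int], preferred_validation_position: int | None = None) -> list[dict[str, int]]:
--     unique_positions = sorted({int(position_id) for position_id in position_ids})
--     schedule: list[dict[str, int]] = []
--     for index, holdout_position in enumerate(unique_positions):
--         remaining = [position for position in unique_positions if position != holdout_position]
--         if not remaining:
--             continue
--         if preferred_validation_position is not None and preferred_validation_position in remaining:
--             validation_position = preferred_validation_position
--         else: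
--             validation_position = remaining[index % len(remaining)]
--         schedule.append(
--             {
--                 "holdout_position": holdout_position,
--                 "validation_position": validation_position,
--             }
--         )
--     return schedule
-- ===== SOURCE B (Python) =====
-- def build_lopo_schedule(position_ids: list[int], preferred_validation_position: int | None = None) -> list[dict[str, int]]:
--     unique = sorted({int(p) for p in position_ids})
--     n = len(unique)
--     if n < 2:
--         return []
--     pref_ok = preferred_validation_position is not None and preferred_validation_position in set(unique)
--     schedule = []
--     for i, holdout in enumerate(unique):
--         if pref_ok and preferred_validation_position != holdout:
--             validation = preferred_validation_position
--         else:
--             j = i % (n - 1)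
--             validation = unique[j] if j < i else unique[j + 1]
--         schedule.append({"holdout_position": holdout, "validation_position": validation})
--     return schedule
-- ===== Notes on version B (the rewrite author's own statement) =====
-- stated objective: faster
-- what changed: Instead of rebuilding the filtered 'remaining' list for every holdout position, B sorts the unique positions once and computes the fallback validation element by index arithmetic (remaining[j] is unique[j] or unique[j+1]), and precomputes the preferred-position membership once.
import Mathlib
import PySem

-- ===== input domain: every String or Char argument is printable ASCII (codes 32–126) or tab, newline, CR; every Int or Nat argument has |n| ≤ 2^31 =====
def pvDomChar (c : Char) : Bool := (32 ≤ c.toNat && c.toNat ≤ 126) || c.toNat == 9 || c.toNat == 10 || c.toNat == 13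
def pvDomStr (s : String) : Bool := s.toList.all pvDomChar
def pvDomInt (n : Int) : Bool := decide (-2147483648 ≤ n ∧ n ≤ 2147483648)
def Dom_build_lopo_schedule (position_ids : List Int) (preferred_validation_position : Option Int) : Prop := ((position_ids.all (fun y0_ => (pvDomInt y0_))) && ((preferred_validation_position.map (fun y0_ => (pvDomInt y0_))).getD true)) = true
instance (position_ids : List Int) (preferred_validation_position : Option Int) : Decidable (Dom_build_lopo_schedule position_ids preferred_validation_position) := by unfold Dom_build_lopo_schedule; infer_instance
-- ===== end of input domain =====

-- B replaces A's per-iteration rebuild of the `remaining` list by index arithmetic on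
-- the sorted unique list (objective: faster, A is O(n^2) over the unique positions, B is O(n) after sorting).

-- ===== PORT A =====
def build_lopo_schedule (position_ids : List Int) (preferred_validation_position : Option Int) : List (List (String × Int)) :=
  let unique_positions := PySem.List.sorted (PySem.Set.ofList position_ids) (fun x => x)
  (PySem.List.enumerate unique_positions 0).foldl
    (fun schedule ih =>
      let remaining := unique_positions.filter (fun p => p != ih.2)
      if remaining = [] then schedule
      else
        let validation :=
          match preferred_validation_position with
          | some p =>
            if p ∈ remaining then p
            -- index is always in range (0 ≤ i % len < len), so the default 0 is never used
            else PySem.List.pyGetD remaining (PySem.Int.mod ih.1 (remaining.length : Int)) 0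
          | none => PySem.List.pyGetD remaining (PySem.Int.mod ih.1 (remaining.length : Int)) 0
        schedule ++ [[("holdout_position", ih.2), ("validation_position", validation)]])
    []

-- ===== PORT B =====
def build_lopo_schedule_alt (position_ids : List Int) (preferred_validation_position : Option Int) : List (List (String × Int)) :=
  let unique := PySem.List.sorted (PySem.Set.ofList position_ids) (fun x => x)
  let n := unique.length
  if n < 2 then []
  else
    let prefOk : Bool :=
      match preferred_validation_position with
      | some p => (PySem.Set.ofList unique).contains p
      | none => false
    (PySem.List.enumerate unique 0).foldl
      (fun schedule ih =>
        let validation :=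
          match preferred_validation_position with
          | some p =>
            if prefOk && (p != ih.2) then p
            else
              let j := PySem.Int.mod ih.1 ((n : Int) - 1)
              -- index is always in range, so the default 0 is never used
              PySem.List.pyGetD unique (if j < ih.1 then j else j + 1) 0
          | none =>
            let j := PySem.Int.mod ih.1 ((n : Int) - 1)
            PySem.List.pyGetD unique (if j < ih.1 then j else j + 1) 0
        schedule ++ [[("holdout_position", ih.2), ("validation_position", validation)]])
      []

-- ===== PRECONDITION & SPEC =====
def Spec_build_lopo_schedule (position_ids : List Int) (preferred_validation_position : Option Int) (out : List (List (String × Int))) : Prop := out = build_lopo_schedule_alt position_ids preferred_validation_position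
instance (position_ids : List Int) (preferred_validation_position : Option Int) (out : List (List (String × Int))) : Decidable (Spec_build_lopo_schedule position_ids preferred_validation_position out) := by unfold Spec_build_lopo_schedule; infer_instance

-- ===== CLAIM (what is proved, stated in full; the proofs are below) =====
def Claim_equal_build_lopo_schedule : Prop := ∀ (position_ids : List Int) (preferred_validation_position : Option Int), Dom_build_lopo_schedule position_ids preferred_validation_position → Spec_build_lopo_schedule position_ids preferred_validation_position (build_lopo_schedule position_ids preferred_validation_position)

-- ===== LEMMAS AND PROOFS =====

-- filtering out the k-th element of a duplicate-free list removes exactly index k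
theorem filter_ne_eq_eraseIdx {L : List Int} (hnd : L.Nodup) (k : Nat) (hk : k < L.length) :
    L.filter (fun p => p != L[k]) = L.eraseIdx k := by
  induction L generalizing k with
  | nil => simp at hk
  | cons a t ih =>
    rcases List.nodup_cons.mp hnd with ⟨ha, hnt⟩
    cases k with
    | zero =>
      simp only [List.getElem_cons_zero, List.eraseIdx_cons_zero, List.filter_cons]
      simp only [bne_self_eq_false, Bool.false_eq_true, if_false]
      exact List.filter_eq_self.mpr (fun x hx => by
        simp only [bne_iff_ne, ne_eq]; exact fun h => ha (h ▸ hx))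
    | succ k =>
      have hk' : k < t.length := by simpa using hk
      have hm : t[k] ∈ t := List.getElem_mem hk'
      simp only [List.getElem_cons_succ, List.eraseIdx_cons_succ, List.filter_cons]
      have : (a != t[k]) = true := by
        simp only [bne_iff_ne, ne_eq]; exact fun h => ha (h ▸ hm)
      rw [this, if_pos rfl, ih hnt k hk']

-- the loop bodies agree element-by-element on a duplicate-free list of length ≥ 2
theorem body_eq (L : List Int) (pref : Option Int) (hnd : L.Nodup) (hn : 2 ≤ L.length)
    (k : Nat) (hk : k < L.length) (schedule : List (List (String × Int))) :
    (let remaining := L.filter (fun p => p != L[k])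
     if remaining = [] then schedule
     else
       let validation :=
         match pref with
         | some p =>
           if p ∈ remaining then p
           else PySem.List.pyGetD remaining (PySem.Int.mod (k : Int) (remaining.length : Int)) 0
         | none => PySem.List.pyGetD remaining (PySem.Int.mod (k : Int) (remaining.length : Int)) 0
       schedule ++ [[("holdout_position", L[k]), ("validation_position", validation)]]) =
    (let validation :=
       match pref with
       | some p =>
         if (match pref with
             | some q => (PySem.Set.ofList L).contains q
             | none => false) && (p != L[k]) then p
         else
           let j := PySem.Int.mod (k : Int) ((L.length : Int) - 1)
           PySem.List.pyGetD L (if j < (k : Int) then j else j + 1) 0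
       | none =>
         let j := PySem.Int.mod (k : Int) ((L.length : Int) - 1)
         PySem.List.pyGetD L (if j < (k : Int) then j else j + 1) 0
     schedule ++ [[("holdout_position", L[k]), ("validation_position", validation)]]) := by
  have hfe : L.filter (fun p => p != L[k]) = L.eraseIdx k := filter_ne_eq_eraseIdx hnd k hk
  have hlen : (L.eraseIdx k).length = L.length - 1 := by
    rw [List.length_eraseIdx, if_pos hk]
  have hne : ¬ (L.filter (fun p => p != L[k]) = []) := by
    rw [hfe, ← List.length_eq_zero_iff, hlen]; omega
  rw [hfe]  -- rewrite occurrences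
  simp only [if_neg (hfe ▸ hne)]
  -- the two index computations agree
  have hm : k % (L.length - 1) < L.length - 1 := Nat.mod_lt _ (by omega)
  have hidx : PySem.List.pyGetD (L.eraseIdx k) (PySem.Int.mod (k : Int) ((L.eraseIdx k).length : Int)) 0 =
      PySem.List.pyGetD L (if PySem.Int.mod (k : Int) ((L.length : Int) - 1) < (k : Int)
        then PySem.Int.mod (k : Int) ((L.length : Int) - 1)
        else PySem.Int.mod (k : Int) ((L.length : Int) - 1) + 1) 0 := by
    have hcast : ((L.length : Int) - 1) = ((L.length - 1 : Nat) : Int) := by omega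
    rw [hlen, hcast, PySem.Int.mod_natCast]
    have hlt : ((k % (L.length - 1) : Nat) : Int) < (k : Int) ↔ k % (L.length - 1) < k := by
      exact_mod_cast Iff.rfl
    by_cases h : k % (L.length - 1) < k
    · rw [if_pos (hlt.mpr h), PySem.List.pyGetD_natCast, PySem.List.pyGetD_natCast]
      rw [List.getD_eq_getElem _ _ (by omega), List.getD_eq_getElem _ _ (by omega),
          List.getElem_eraseIdx, dif_pos h]
    · rw [if_neg (fun hh => h (hlt.mp hh))]
      have : ((k % (L.length - 1) : Nat) : Int) + 1 = ((k % (L.length - 1) + 1 : Nat) : Int) := by omega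
      rw [this, PySem.List.pyGetD_natCast, PySem.List.pyGetD_natCast]
      rw [List.getD_eq_getElem _ _ (by omega), List.getD_eq_getElem _ _ (by omega),
          List.getElem_eraseIdx, dif_neg h]
  cases pref with
  | none => simp only [hidx]
  | some p =>
    -- membership in remaining = membership in L and ≠ holdout
    have hmem : (p ∈ L.eraseIdx k) ↔ ((((PySem.Set.ofList L).contains p) && (p != L[k])) = true) := by
      rw [← hfe, List.mem_filter]
      simp [PySem.Set.mem_ofList]
    by_cases hp : p ∈ L.eraseIdx k
    · have hb := hmem.mp hp
      simp only [hp, if_true, hb]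
    · have hb : (((PySem.Set.ofList L).contains p) && (p != L[k])) = false := by
        by_contra h
        exact hp (hmem.mpr (by simpa using h))
      simp only [hp, hb, Bool.false_eq_true, if_false, hidx]

-- ===== VERDICT (by name: the statement is the Claim_ definition above) =====
theorem build_lopo_schedule_spec : Claim_equal_build_lopo_schedule := by
  intro ids pref _
  unfold Spec_build_lopo_schedule build_lopo_schedule build_lopo_schedule_alt
  set L := PySem.List.sorted (PySem.Set.ofList ids) (fun x => x) with hL
  have hpw : L.Pairwise (· < ·) := PySem.List.sorted_ofList_pairwise_lt ids
  have hnd : L.Nodup := hpw.imp (fun h => ne_of_lt h)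
  by_cases hn : L.length < 2
  · rw [if_pos hn]
    -- length 0 or 1: A's loop appends nothing
    interval_cases h : L.length
    · rw [List.length_eq_zero_iff.mp h]; rfl
    · obtain ⟨a, ha⟩ := List.length_eq_one_iff.mp h
      rw [ha]
      simp [PySem.List.enumerate]
  · rw [if_neg hn]
    have hn2 : 2 ≤ L.length := by omega
    apply PySem.List.foldl_congr_mem
    intro acc x hx
    obtain ⟨k, hk, rfl⟩ := (PySem.List.mem_enumerate_iff L 0 x).mp hx
    simp only [zero_add]
    exact body_eq L pref hnd hn2 k hk acc
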